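-- pv_equiv track=rewrite | github.com/solberg-eric/4-seasons-ai-bot | print-hand.py | print_hand
-- ===== SOURCE A (Python) =====
-- def print_hand(hand_unsorted, trump):
--     i = 0
--     j = 0
--     k = 0
--     l = 0
--     hand_sorted = [["  ", "  ", "  ", "  "],
--                    ["  ", "  ", "  ", "  "],
--                    ["  ", "  ", "  ", "  "],
--                    ["  ", "  ", "  ", "  "],
--                    ["  ", "  ", "  ", "  "],
--                    ["  ", "  ", "  ", "  "],
--                    ["  ", "  ", "  ", "  "],
--                    ["  ", "  ", "  ", "  "]]
--     for card in hand_unsorted: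
--         if trump[0] in card:
--             hand_sorted[i][0] = card
--             i += 1
--         elif trump[1] in card:
--             hand_sorted[j][1] = card
--             j += 1
--         elif trump[2] in card:
--             hand_sorted[k][2] = card
--             k += 1
--         else:
--             hand_sorted[l][3] = card
--             l += 1
--     d = 8
--     for i in range(7, -1, -1):
--         if hand_sorted[i][0] == "  " and hand_sorted[i][1] == "  " and hand_sorted[i][2] == "  " and hand_sorted[i][3] == "  ":
--             hand_sorted.pop(i)
--             d = i
--         else:
--             break
--     return hand_sorted, d
-- ===== SOURCE B (Python) =====
-- def print_hand(hand_unsorted, trump):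
--     c0, c1, c2, c3 = [], [], [], []
--     for card in hand_unsorted:
--         if trump[0] in card:
--             c0.append(card)
--         elif trump[1] in card:
--             c1.append(card)
--         elif trump[2] in card:
--             c2.append(card)
--         else:
--             c3.append(card)
--     m = max(len(c0), len(c1), len(c2), len(c3))
--     rows = [[c[r] if r < len(c) else "  " for c in (c0, c1, c2, c3)]
--             for r in range(m)]
--     while rows and rows[-1] == ["  ", "  ", "  ", "  "]:
--         rows.pop()
--     return rows, len(rows)
-- ===== Notes on version B (the rewrite author's own statement) =====
-- stated objective: simpler
-- what changed: B buckets the cards into four per-suit column lists with the same membership cascade, transposes them into max-column-length rows, and strips trailing all-blank rows, instead of A's fixed 8x4 sentinel-filled grid updated through four row counters and trimmed bottom-up by index with pop.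
import Mathlib
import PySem

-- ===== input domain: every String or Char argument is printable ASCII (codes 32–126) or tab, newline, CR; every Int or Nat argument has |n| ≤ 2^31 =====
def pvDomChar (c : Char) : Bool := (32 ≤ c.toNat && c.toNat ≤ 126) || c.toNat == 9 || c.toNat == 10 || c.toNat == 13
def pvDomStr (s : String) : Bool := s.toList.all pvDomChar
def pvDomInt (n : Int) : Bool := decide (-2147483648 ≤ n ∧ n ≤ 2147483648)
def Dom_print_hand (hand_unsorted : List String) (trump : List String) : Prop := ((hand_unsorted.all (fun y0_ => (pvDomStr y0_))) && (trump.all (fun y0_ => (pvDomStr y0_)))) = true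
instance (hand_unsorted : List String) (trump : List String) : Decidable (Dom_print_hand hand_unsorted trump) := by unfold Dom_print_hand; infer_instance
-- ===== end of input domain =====

-- B buckets each card into four per-suit column lists and transposes them into rows,
-- instead of A's fixed 8x4 grid filled by counters and trimmed bottom-up (objective: simpler).

-- ===== PORT A =====
-- the cascade body of A's first loop, one card at a time
def printHandStepA (trump : List String) (st : Int × Int × Int × Int × List (List String))
    (card : String) : Int × Int × Int × Int × List (List String) :=
  -- st = (i, j, k, l, hand_sorted)
  if PySem.Str.isIn (PySem.List.pyGetD trump 0 "") card then
    (st.1 + 1, st.2.1, st.2.2.1, st.2.2.2.1,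
     PySem.List.pySetD st.2.2.2.2 st.1 ((PySem.List.pyGetD st.2.2.2.2 st.1 []).set 0 card))
  else if PySem.Str.isIn (PySem.List.pyGetD trump 1 "") card then
    (st.1, st.2.1 + 1, st.2.2.1, st.2.2.2.1,
     PySem.List.pySetD st.2.2.2.2 st.2.1 ((PySem.List.pyGetD st.2.2.2.2 st.2.1 []).set 1 card))
  else if PySem.Str.isIn (PySem.List.pyGetD trump 2 "") card then
    (st.1, st.2.1, st.2.2.1 + 1, st.2.2.2.1,
     PySem.List.pySetD st.2.2.2.2 st.2.2.1 ((PySem.List.pyGetD st.2.2.2.2 st.2.2.1 []).set 2 card))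
  else
    (st.1, st.2.1, st.2.2.1, st.2.2.2.1 + 1,
     PySem.List.pySetD st.2.2.2.2 st.2.2.2.1 ((PySem.List.pyGetD st.2.2.2.2 st.2.2.2.1 []).set 3 card))

-- A's second loop: for i in range(7,-1,-1): pop trailing all-"  " rows, d = i; break otherwise
def printHandTrim : List Int → List (List String) → Int → List (List String) × Int
  | [], hs, d => (hs, d)
  | i :: rest, hs, d =>
    let row := PySem.List.pyGetD hs i []
    if PySem.List.pyGetD row 0 "" = "  " ∧ PySem.List.pyGetD row 1 "" = "  " ∧
       PySem.List.pyGetD row 2 "" = "  " ∧ PySem.List.pyGetD row 3 "" = "  " then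
      printHandTrim rest (((PySem.List.pop? hs i).map Prod.snd).getD hs) i
    else (hs, d)

def print_hand (hand_unsorted : List String) (trump : List String) : List (List String) × Int :=
  let init : List (List String) :=
    [["  ", "  ", "  ", "  "], ["  ", "  ", "  ", "  "], ["  ", "  ", "  ", "  "],
     ["  ", "  ", "  ", "  "], ["  ", "  ", "  ", "  "], ["  ", "  ", "  ", "  "],
     ["  ", "  ", "  ", "  "], ["  ", "  ", "  ", "  "]]
  let st := hand_unsorted.foldl (printHandStepA trump) (0, 0, 0, 0, init)
  printHandTrim (PySem.List.pyRange 7 (-1) (-1)) st.2.2.2.2 8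

-- ===== PORT B =====
-- B's cascade: append the card to its suit column
def printHandStepB (trump : List String)
    (cs : List String × List String × List String × List String) (card : String) :
    List String × List String × List String × List String :=
  -- cs = (c0, c1, c2, c3)
  if PySem.Str.isIn (PySem.List.pyGetD trump 0 "") card then (cs.1 ++ [card], cs.2.1, cs.2.2.1, cs.2.2.2)
  else if PySem.Str.isIn (PySem.List.pyGetD trump 1 "") card then (cs.1, cs.2.1 ++ [card], cs.2.2.1, cs.2.2.2)
  else if PySem.Str.isIn (PySem.List.pyGetD trump 2 "") card then (cs.1, cs.2.1, cs.2.2.1 ++ [card], cs.2.2.2)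
  else (cs.1, cs.2.1, cs.2.2.1, cs.2.2.2 ++ [card])

-- while rows and rows[-1] == ["  ", "  ", "  ", "  "]: rows.pop()
-- (each pop shortens rows, so rows.length iterations always suffice)
def printHandAltStripGo : Nat → List (List String) → List (List String)
  | 0, rows => rows
  | fuel + 1, rows =>
    if rows.getLast? = some ["  ", "  ", "  ", "  "] then
      printHandAltStripGo fuel rows.dropLast
    else rows

def printHandAltStrip (rows : List (List String)) : List (List String) :=
  printHandAltStripGo rows.length rows

def print_hand_alt (hand_unsorted : List String) (trump : List String) :
    List (List String) × Int :=
  let cs := hand_unsorted.foldl (printHandStepB trump) ([], [], [], [])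
  let m := max (max cs.1.length cs.2.1.length) (max cs.2.2.1.length cs.2.2.2.length)
  let rows := (List.range m).map (fun r =>
      [cs.1.getD r "  ", cs.2.1.getD r "  ", cs.2.2.1.getD r "  ", cs.2.2.2.getD r "  "])
  let rows' := printHandAltStrip rows
  (rows', (rows'.length : Int))

-- ===== PRECONDITION & SPEC =====
-- Pre_ excludes exactly the inputs on which Python A raises IndexError: some card reaches a
-- missing trump[0]/trump[1]/trump[2], or some suit column gets more than 8 cards and the
-- 8-row grid overflows.
def Pre_print_hand (hand_unsorted : List String) (trump : List String) : Prop :=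
  (∀ card ∈ hand_unsorted,
      (1 ≤ trump.length ∧ PySem.Str.isIn (PySem.List.pyGetD trump 0 "") card = true) ∨
      (2 ≤ trump.length ∧ PySem.Str.isIn (PySem.List.pyGetD trump 1 "") card = true) ∨
      3 ≤ trump.length) ∧
  hand_unsorted.countP (fun c => PySem.Str.isIn (PySem.List.pyGetD trump 0 "") c) ≤ 8 ∧
  hand_unsorted.countP (fun c => !PySem.Str.isIn (PySem.List.pyGetD trump 0 "") c &&
      PySem.Str.isIn (PySem.List.pyGetD trump 1 "") c) ≤ 8 ∧
  hand_unsorted.countP (fun c => !PySem.Str.isIn (PySem.List.pyGetD trump 0 "") c &&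
      !PySem.Str.isIn (PySem.List.pyGetD trump 1 "") c &&
      PySem.Str.isIn (PySem.List.pyGetD trump 2 "") c) ≤ 8 ∧
  hand_unsorted.countP (fun c => !PySem.Str.isIn (PySem.List.pyGetD trump 0 "") c &&
      !PySem.Str.isIn (PySem.List.pyGetD trump 1 "") c &&
      !PySem.Str.isIn (PySem.List.pyGetD trump 2 "") c) ≤ 8
instance (hand_unsorted : List String) (trump : List String) :
    Decidable (Pre_print_hand hand_unsorted trump) := by unfold Pre_print_hand; infer_instance

def pvWitness_print_hand : List String × List String := (["9H", "10S", "JH"], ["H", "D", "S"])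

def Spec_print_hand (hand_unsorted : List String) (trump : List String)
    (out : List (List String) × Int) : Prop := out = print_hand_alt hand_unsorted trump
instance (hand_unsorted : List String) (trump : List String) (out : List (List String) × Int) :
    Decidable (Spec_print_hand hand_unsorted trump out) := by unfold Spec_print_hand; infer_instance

-- ===== CLAIM (what is proved, stated in full; the proofs are below) =====
def Claim_equal_print_hand : Prop := ∀ (hand_unsorted : List String) (trump : List String), Dom_print_hand hand_unsorted trump → Pre_print_hand hand_unsorted trump → Spec_print_hand hand_unsorted trump (print_hand hand_unsorted trump)


-- ===== LEMMAS AND PROOFS =====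

-- one display row: entry r of each column, blank past the column's end
def phRow (c0 c1 c2 c3 : List String) (r : Nat) : List String :=
  [c0.getD r "  ", c1.getD r "  ", c2.getD r "  ", c3.getD r "  "]

-- the first n display rows
def phGrid (n : Nat) (c0 c1 c2 c3 : List String) : List (List String) :=
  (List.range n).map (phRow c0 c1 c2 c3)

-- the four suit predicates of the cascade
def phQ0 (trump : List String) (c : String) : Bool :=
  PySem.Str.isIn (PySem.List.pyGetD trump 0 "") c
def phQ1 (trump : List String) (c : String) : Bool :=
  !phQ0 trump c && PySem.Str.isIn (PySem.List.pyGetD trump 1 "") c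
def phQ2 (trump : List String) (c : String) : Bool :=
  !phQ0 trump c && !PySem.Str.isIn (PySem.List.pyGetD trump 1 "") c &&
    PySem.Str.isIn (PySem.List.pyGetD trump 2 "") c
def phQ3 (trump : List String) (c : String) : Bool :=
  !phQ0 trump c && !PySem.Str.isIn (PySem.List.pyGetD trump 1 "") c &&
    !PySem.Str.isIn (PySem.List.pyGetD trump 2 "") c

theorem getElem?_snoc_ne {α : Type} (c : List α) (x : α) (m : Nat) (h : m ≠ c.length) :
    getElem? (c ++ [x]) m = getElem? c m := by
  rcases Nat.lt_or_ge m c.length with hlt | hge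
  · exact List.getElem?_append_left hlt
  · have h1 : c.length < m := lt_of_le_of_ne hge (Ne.symm h)
    rw [List.getElem?_eq_none (by simp; omega), List.getElem?_eq_none (by omega)]

theorem getD_snoc_ne {α : Type} (c : List α) (x : α) (m : Nat) (h : m ≠ c.length) (d : α) :
    (c ++ [x]).getD m d = c.getD m d := by
  simp only [List.getD_eq_getElem?_getD]
  rw [getElem?_snoc_ne c x m h]

theorem getD_snoc_self {α : Type} (c : List α) (x : α) (d : α) :
    (c ++ [x]).getD c.length d = x := by
  induction c with
  | nil => rfl
  | cons a t ih => simpa using ih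

theorem eraseIdx_snoc {α : Type} (l : List α) (x : α) : (l ++ [x]).eraseIdx l.length = l := by
  induction l with
  | nil => rfl
  | cons a t ih => simp [ih]

-- writing card into column 0 at row c0.length of the full 8-row grid appends it to column 0
theorem phGrid_set0 (c0 c1 c2 c3 : List String) (card : String) (h : c0.length < 8) :
    PySem.List.pySetD (phGrid 8 c0 c1 c2 c3) (c0.length : Int)
      ((PySem.List.pyGetD (phGrid 8 c0 c1 c2 c3) (c0.length : Int) []).set 0 card)
    = phGrid 8 (c0 ++ [card]) c1 c2 c3 := by
  have hg : PySem.List.pyGetD (phGrid 8 c0 c1 c2 c3) (c0.length : Int) []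
      = phRow c0 c1 c2 c3 c0.length := by
    rw [PySem.List.pyGetD_natCast]
    exact PySem.List.getD_map_range _ 8 _ _ h
  rw [hg, PySem.List.pySetD_natCast]
  apply List.ext_getElem
  · simp [phGrid]
  · intro m hm hm'
    simp only [phGrid] at hm
    simp only [phGrid, List.getElem_set, List.getElem_map, List.getElem_range, phRow, List.set]
    by_cases hmn : c0.length = m
    · subst hmn
      rw [if_pos rfl, getD_snoc_self]
    · rw [if_neg hmn, getD_snoc_ne c0 card m (fun h => hmn h.symm)]

theorem phGrid_set1 (c0 c1 c2 c3 : List String) (card : String) (h : c1.length < 8) :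
    PySem.List.pySetD (phGrid 8 c0 c1 c2 c3) (c1.length : Int)
      ((PySem.List.pyGetD (phGrid 8 c0 c1 c2 c3) (c1.length : Int) []).set 1 card)
    = phGrid 8 c0 (c1 ++ [card]) c2 c3 := by
  have hg : PySem.List.pyGetD (phGrid 8 c0 c1 c2 c3) (c1.length : Int) []
      = phRow c0 c1 c2 c3 c1.length := by
    rw [PySem.List.pyGetD_natCast]
    exact PySem.List.getD_map_range _ 8 _ _ h
  rw [hg, PySem.List.pySetD_natCast]
  apply List.ext_getElem
  · simp [phGrid]
  · intro m hm hm'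
    simp only [phGrid] at hm
    simp only [phGrid, List.getElem_set, List.getElem_map, List.getElem_range, phRow, List.set]
    by_cases hmn : c1.length = m
    · subst hmn
      rw [if_pos rfl, getD_snoc_self]
    · rw [if_neg hmn, getD_snoc_ne c1 card m (fun h => hmn h.symm)]

theorem phGrid_set2 (c0 c1 c2 c3 : List String) (card : String) (h : c2.length < 8) :
    PySem.List.pySetD (phGrid 8 c0 c1 c2 c3) (c2.length : Int)
      ((PySem.List.pyGetD (phGrid 8 c0 c1 c2 c3) (c2.length : Int) []).set 2 card)
    = phGrid 8 c0 c1 (c2 ++ [card]) c3 := by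
  have hg : PySem.List.pyGetD (phGrid 8 c0 c1 c2 c3) (c2.length : Int) []
      = phRow c0 c1 c2 c3 c2.length := by
    rw [PySem.List.pyGetD_natCast]
    exact PySem.List.getD_map_range _ 8 _ _ h
  rw [hg, PySem.List.pySetD_natCast]
  apply List.ext_getElem
  · simp [phGrid]
  · intro m hm hm'
    simp only [phGrid] at hm
    simp only [phGrid, List.getElem_set, List.getElem_map, List.getElem_range, phRow, List.set]
    by_cases hmn : c2.length = m
    · subst hmn
      rw [if_pos rfl, getD_snoc_self]
    · rw [if_neg hmn, getD_snoc_ne c2 card m (fun h => hmn h.symm)]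

theorem phGrid_set3 (c0 c1 c2 c3 : List String) (card : String) (h : c3.length < 8) :
    PySem.List.pySetD (phGrid 8 c0 c1 c2 c3) (c3.length : Int)
      ((PySem.List.pyGetD (phGrid 8 c0 c1 c2 c3) (c3.length : Int) []).set 3 card)
    = phGrid 8 c0 c1 c2 (c3 ++ [card]) := by
  have hg : PySem.List.pyGetD (phGrid 8 c0 c1 c2 c3) (c3.length : Int) []
      = phRow c0 c1 c2 c3 c3.length := by
    rw [PySem.List.pyGetD_natCast]
    exact PySem.List.getD_map_range _ 8 _ _ h
  rw [hg, PySem.List.pySetD_natCast]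
  apply List.ext_getElem
  · simp [phGrid]
  · intro m hm hm'
    simp only [phGrid] at hm
    simp only [phGrid, List.getElem_set, List.getElem_map, List.getElem_range, phRow, List.set]
    by_cases hmn : c3.length = m
    · subst hmn
      rw [if_pos rfl, getD_snoc_self]
    · rw [if_neg hmn, getD_snoc_ne c3 card m (fun h => hmn h.symm)]

-- invariant of A's first loop: the grid renders the four columns collected so far
theorem foldA_eq (trump : List String) (hand : List String) :
    ∀ (c0 c1 c2 c3 : List String),
    c0.length + hand.countP (phQ0 trump) ≤ 8 →
    c1.length + hand.countP (phQ1 trump) ≤ 8 →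
    c2.length + hand.countP (phQ2 trump) ≤ 8 →
    c3.length + hand.countP (phQ3 trump) ≤ 8 →
    hand.foldl (printHandStepA trump)
      ((c0.length : Int), (c1.length : Int), (c2.length : Int), (c3.length : Int),
        phGrid 8 c0 c1 c2 c3)
    = (((c0 ++ hand.filter (phQ0 trump)).length : Int),
       ((c1 ++ hand.filter (phQ1 trump)).length : Int),
       ((c2 ++ hand.filter (phQ2 trump)).length : Int),
       ((c3 ++ hand.filter (phQ3 trump)).length : Int),
       phGrid 8 (c0 ++ hand.filter (phQ0 trump)) (c1 ++ hand.filter (phQ1 trump))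
         (c2 ++ hand.filter (phQ2 trump)) (c3 ++ hand.filter (phQ3 trump))) := by
  induction hand with
  | nil => intro c0 c1 c2 c3 _ _ _ _; simp
  | cons card rest ih =>
    intro c0 c1 c2 c3 h0 h1 h2 h3
    rw [List.foldl_cons]
    by_cases hq0 : PySem.Chars.isIn (PySem.List.pyGetD trump 0 "").toList card.toList = true
    · have hlen : c0.length < 8 := by
        have : rest.countP (phQ0 trump) + 1 = (card :: rest).countP (phQ0 trump) := by
          simp [List.countP_cons, phQ0, hq0]
        omega
      have hstep : printHandStepA trump
          ((c0.length : Int), (c1.length : Int), (c2.length : Int), (c3.length : Int),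
            phGrid 8 c0 c1 c2 c3) card
          = (((c0 ++ [card]).length : Int), (c1.length : Int), (c2.length : Int),
             (c3.length : Int), phGrid 8 (c0 ++ [card]) c1 c2 c3) := by
        simp only [printHandStepA]
        rw [if_pos (show PySem.Str.isIn (PySem.List.pyGetD trump 0 "") card = true from hq0), phGrid_set0 c0 c1 c2 c3 card hlen]
        simp [List.length_append]
      rw [hstep, ih (c0 ++ [card]) c1 c2 c3
        (by simp [List.countP_cons, phQ0, phQ1, phQ2, phQ3, hq0] at h0 ⊢; try omega)
        (by simp [List.countP_cons, phQ0, phQ1, phQ2, phQ3, hq0] at h1 ⊢; try omega)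
        (by simp [List.countP_cons, phQ0, phQ1, phQ2, phQ3, hq0] at h2 ⊢; try omega)
        (by simp [List.countP_cons, phQ0, phQ1, phQ2, phQ3, hq0] at h3 ⊢; try omega)]
      have hf0 : (card :: rest).filter (phQ0 trump) = card :: rest.filter (phQ0 trump) := by
        simp [List.filter_cons, phQ0, hq0]
      have hf1 : (card :: rest).filter (phQ1 trump) = rest.filter (phQ1 trump) := by
        simp [List.filter_cons, phQ1, phQ0, hq0]
      have hf2 : (card :: rest).filter (phQ2 trump) = rest.filter (phQ2 trump) := by
        simp [List.filter_cons, phQ2, phQ0, hq0]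
      have hf3 : (card :: rest).filter (phQ3 trump) = rest.filter (phQ3 trump) := by
        simp [List.filter_cons, phQ3, phQ0, hq0]
      rw [hf0, hf1, hf2, hf3]
      simp
    · by_cases hq1 : PySem.Chars.isIn (PySem.List.pyGetD trump 1 "").toList card.toList = true
      · have hlen : c1.length < 8 := by
          have : rest.countP (phQ1 trump) + 1 = (card :: rest).countP (phQ1 trump) := by
            simp [List.countP_cons, phQ1, phQ0, hq0, hq1]
          omega
        have hstep : printHandStepA trump
            ((c0.length : Int), (c1.length : Int), (c2.length : Int), (c3.length : Int),
              phGrid 8 c0 c1 c2 c3) card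
            = ((c0.length : Int), ((c1 ++ [card]).length : Int), (c2.length : Int),
               (c3.length : Int), phGrid 8 c0 (c1 ++ [card]) c2 c3) := by
          simp only [printHandStepA]
          rw [if_neg (show ¬ PySem.Str.isIn (PySem.List.pyGetD trump 0 "") card = true from hq0), if_pos (show PySem.Str.isIn (PySem.List.pyGetD trump 1 "") card = true from hq1), phGrid_set1 c0 c1 c2 c3 card hlen]
          simp [List.length_append]
        rw [hstep, ih c0 (c1 ++ [card]) c2 c3
          (by simp [List.countP_cons, phQ0, phQ1, phQ2, phQ3, hq0] at h0 ⊢; try omega)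
          (by simp [List.countP_cons, phQ0, phQ1, phQ2, phQ3, hq0, hq1] at h1 ⊢; try omega)
          (by simp [List.countP_cons, phQ0, phQ1, phQ2, phQ3, hq0, hq1] at h2 ⊢; try omega)
          (by simp [List.countP_cons, phQ0, phQ1, phQ2, phQ3, hq0, hq1] at h3 ⊢; try omega)]
        have hf0 : (card :: rest).filter (phQ0 trump) = rest.filter (phQ0 trump) := by
          simp [List.filter_cons, phQ0, hq0]
        have hf1 : (card :: rest).filter (phQ1 trump) = card :: rest.filter (phQ1 trump) := by
          simp [List.filter_cons, phQ1, phQ0, hq0, hq1]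
        have hf2 : (card :: rest).filter (phQ2 trump) = rest.filter (phQ2 trump) := by
          simp [List.filter_cons, phQ2, phQ0, hq0, hq1]
        have hf3 : (card :: rest).filter (phQ3 trump) = rest.filter (phQ3 trump) := by
          simp [List.filter_cons, phQ3, phQ0, hq0, hq1]
        rw [hf0, hf1, hf2, hf3]
        simp
      · by_cases hq2 : PySem.Chars.isIn (PySem.List.pyGetD trump 2 "").toList card.toList = true
        · have hlen : c2.length < 8 := by
            have : rest.countP (phQ2 trump) + 1 = (card :: rest).countP (phQ2 trump) := by
              simp [List.countP_cons, phQ2, phQ0, hq0, hq1, hq2]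
            omega
          have hstep : printHandStepA trump
              ((c0.length : Int), (c1.length : Int), (c2.length : Int), (c3.length : Int),
                phGrid 8 c0 c1 c2 c3) card
              = ((c0.length : Int), (c1.length : Int), ((c2 ++ [card]).length : Int),
                 (c3.length : Int), phGrid 8 c0 c1 (c2 ++ [card]) c3) := by
            simp only [printHandStepA]
            rw [if_neg (show ¬ PySem.Str.isIn (PySem.List.pyGetD trump 0 "") card = true from hq0), if_neg (show ¬ PySem.Str.isIn (PySem.List.pyGetD trump 1 "") card = true from hq1), if_pos (show PySem.Str.isIn (PySem.List.pyGetD trump 2 "") card = true from hq2), phGrid_set2 c0 c1 c2 c3 card hlen]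
            simp [List.length_append]
          rw [hstep, ih c0 c1 (c2 ++ [card]) c3
            (by simp [List.countP_cons, phQ0, phQ1, phQ2, phQ3, hq0] at h0 ⊢; try omega)
            (by simp [List.countP_cons, phQ0, phQ1, phQ2, phQ3, hq0, hq1] at h1 ⊢; try omega)
            (by simp [List.countP_cons, phQ0, phQ1, phQ2, phQ3, hq0, hq1, hq2] at h2 ⊢; try omega)
            (by simp [List.countP_cons, phQ0, phQ1, phQ2, phQ3, hq0, hq1, hq2] at h3 ⊢; try omega)]
          have hf0 : (card :: rest).filter (phQ0 trump) = rest.filter (phQ0 trump) := by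
            simp [List.filter_cons, phQ0, hq0]
          have hf1 : (card :: rest).filter (phQ1 trump) = rest.filter (phQ1 trump) := by
            simp [List.filter_cons, phQ1, phQ0, hq0, hq1]
          have hf2 : (card :: rest).filter (phQ2 trump) = card :: rest.filter (phQ2 trump) := by
            simp [List.filter_cons, phQ2, phQ0, hq0, hq1, hq2]
          have hf3 : (card :: rest).filter (phQ3 trump) = rest.filter (phQ3 trump) := by
            simp [List.filter_cons, phQ3, phQ0, hq0, hq1, hq2]
          rw [hf0, hf1, hf2, hf3]
          simp
        · have hlen : c3.length < 8 := by
            have : rest.countP (phQ3 trump) + 1 = (card :: rest).countP (phQ3 trump) := by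
              simp [List.countP_cons, phQ3, phQ0, hq0, hq1, hq2]
            omega
          have hstep : printHandStepA trump
              ((c0.length : Int), (c1.length : Int), (c2.length : Int), (c3.length : Int),
                phGrid 8 c0 c1 c2 c3) card
              = ((c0.length : Int), (c1.length : Int), (c2.length : Int),
                 ((c3 ++ [card]).length : Int), phGrid 8 c0 c1 c2 (c3 ++ [card])) := by
            simp only [printHandStepA]
            rw [if_neg (show ¬ PySem.Str.isIn (PySem.List.pyGetD trump 0 "") card = true from hq0), if_neg (show ¬ PySem.Str.isIn (PySem.List.pyGetD trump 1 "") card = true from hq1), if_neg (show ¬ PySem.Str.isIn (PySem.List.pyGetD trump 2 "") card = true from hq2), phGrid_set3 c0 c1 c2 c3 card hlen]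
            simp [List.length_append]
          rw [hstep, ih c0 c1 c2 (c3 ++ [card])
            (by simp [List.countP_cons, phQ0, phQ1, phQ2, phQ3, hq0] at h0 ⊢; try omega)
            (by simp [List.countP_cons, phQ0, phQ1, phQ2, phQ3, hq0, hq1] at h1 ⊢; try omega)
            (by simp [List.countP_cons, phQ0, phQ1, phQ2, phQ3, hq0, hq1, hq2] at h2 ⊢; try omega)
            (by simp [List.countP_cons, phQ0, phQ1, phQ2, phQ3, hq0, hq1, hq2] at h3 ⊢; try omega)]
          have hf0 : (card :: rest).filter (phQ0 trump) = rest.filter (phQ0 trump) := by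
            simp [List.filter_cons, phQ0, hq0]
          have hf1 : (card :: rest).filter (phQ1 trump) = rest.filter (phQ1 trump) := by
            simp [List.filter_cons, phQ1, phQ0, hq0, hq1]
          have hf2 : (card :: rest).filter (phQ2 trump) = rest.filter (phQ2 trump) := by
            simp [List.filter_cons, phQ2, phQ0, hq0, hq1, hq2]
          have hf3 : (card :: rest).filter (phQ3 trump) = card :: rest.filter (phQ3 trump) := by
            simp [List.filter_cons, phQ3, phQ0, hq0, hq1, hq2]
          rw [hf0, hf1, hf2, hf3]
          simp

-- B's loop simply collects the four filters
theorem foldB_eq (trump : List String) (hand : List String) :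
    ∀ (c0 c1 c2 c3 : List String),
    hand.foldl (printHandStepB trump) (c0, c1, c2, c3)
    = (c0 ++ hand.filter (phQ0 trump), c1 ++ hand.filter (phQ1 trump),
       c2 ++ hand.filter (phQ2 trump), c3 ++ hand.filter (phQ3 trump)) := by
  induction hand with
  | nil => intro c0 c1 c2 c3; simp
  | cons card rest ih =>
    intro c0 c1 c2 c3
    rw [List.foldl_cons]
    by_cases hq0 : PySem.Chars.isIn (PySem.List.pyGetD trump 0 "").toList card.toList = true
    · have : printHandStepB trump (c0, c1, c2, c3) card = (c0 ++ [card], c1, c2, c3) := by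
        simp [printHandStepB, hq0]
      rw [this, ih]
      simp [List.filter_cons, phQ0, phQ1, phQ2, phQ3, hq0]
    · by_cases hq1 : PySem.Chars.isIn (PySem.List.pyGetD trump 1 "").toList card.toList = true
      · have : printHandStepB trump (c0, c1, c2, c3) card = (c0, c1 ++ [card], c2, c3) := by
          simp [printHandStepB, hq0, hq1]
        rw [this, ih]
        simp [List.filter_cons, phQ0, phQ1, phQ2, phQ3, hq0, hq1]
      · by_cases hq2 : PySem.Chars.isIn (PySem.List.pyGetD trump 2 "").toList card.toList = true
        · have : printHandStepB trump (c0, c1, c2, c3) card = (c0, c1, c2 ++ [card], c3) := by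
            simp [printHandStepB, hq0, hq1, hq2]
          rw [this, ih]
          simp [List.filter_cons, phQ0, phQ1, phQ2, phQ3, hq0, hq1, hq2]
        · have : printHandStepB trump (c0, c1, c2, c3) card = (c0, c1, c2, c3 ++ [card]) := by
            simp [printHandStepB, hq0, hq1, hq2]
          rw [this, ih]
          simp [List.filter_cons, phQ0, phQ1, phQ2, phQ3, hq0, hq1, hq2]

-- one unfolding of B's strip loop on the empty list, a blank last row, a non-blank last row
theorem strip_nil : printHandAltStrip [] = [] := rfl

theorem strip_snoc_blank (g : List (List String)) :
    printHandAltStrip (g ++ [["  ", "  ", "  ", "  "]]) = printHandAltStrip g := by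
  simp only [printHandAltStrip, List.length_append, List.length_cons, List.length_nil,
    Nat.add_zero]
  simp only [printHandAltStripGo]
  rw [if_pos (by simp), List.dropLast_concat]

theorem strip_snoc_nonblank (g : List (List String)) (row : List String)
    (h : row ≠ ["  ", "  ", "  ", "  "]) :
    printHandAltStrip (g ++ [row]) = g ++ [row] := by
  simp only [printHandAltStrip, List.length_append, List.length_cons, List.length_nil,
    Nat.add_zero]
  simp only [printHandAltStripGo]
  rw [if_neg (by simp [h])]

theorem phGrid_snoc (n : Nat) (c0 c1 c2 c3 : List String) :
    phGrid (n + 1) c0 c1 c2 c3 = phGrid n c0 c1 c2 c3 ++ [phRow c0 c1 c2 c3 n] := by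
  simp [phGrid, List.range_succ]

-- A's trimming loop computes exactly B's strip of the grid, paired with its length
theorem trim_strip (c0 c1 c2 c3 : List String) :
    ∀ n : Nat,
    printHandTrim (PySem.List.pyRange ((n : Int) - 1) (-1) (-1)) (phGrid n c0 c1 c2 c3) (n : Int)
    = (printHandAltStrip (phGrid n c0 c1 c2 c3),
       ((printHandAltStrip (phGrid n c0 c1 c2 c3)).length : Int)) := by
  intro n
  induction n with
  | zero =>
    rw [PySem.List.pyRange_neg_one_eq_nil (by norm_num)]
    have h0 : phGrid 0 c0 c1 c2 c3 = [] := by simp [phGrid]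
    rw [h0, strip_nil]
    rfl
  | succ n ih =>
    have hcast : ((n + 1 : Nat) : Int) - 1 = (n : Int) := by push_cast; ring
    rw [hcast, PySem.List.pyRange_neg_one_cons (by omega)]
    simp only [printHandTrim]
    have hrow : PySem.List.pyGetD (phGrid (n + 1) c0 c1 c2 c3) ((n : Nat) : Int) []
        = phRow c0 c1 c2 c3 n := by
      rw [PySem.List.pyGetD_natCast]
      exact PySem.List.getD_map_range _ (n + 1) n [] (by omega)
    have e0 : PySem.List.pyGetD (phRow c0 c1 c2 c3 n) 0 "" = c0.getD n "  " := by
      simp [phRow, PySem.List.pyGetD, PySem.List.pyGet?, PySem.List.pyIdx?]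
    have e1 : PySem.List.pyGetD (phRow c0 c1 c2 c3 n) 1 "" = c1.getD n "  " := by
      simp [phRow, PySem.List.pyGetD, PySem.List.pyGet?, PySem.List.pyIdx?]
    have e2 : PySem.List.pyGetD (phRow c0 c1 c2 c3 n) 2 "" = c2.getD n "  " := by
      simp [phRow, PySem.List.pyGetD, PySem.List.pyGet?, PySem.List.pyIdx?]
    have e3 : PySem.List.pyGetD (phRow c0 c1 c2 c3 n) 3 "" = c3.getD n "  " := by
      simp [phRow, PySem.List.pyGetD, PySem.List.pyGet?, PySem.List.pyIdx?]
    rw [hrow, e0, e1, e2, e3]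
    by_cases hb : phRow c0 c1 c2 c3 n = ["  ", "  ", "  ", "  "]
    · -- the bottom row is blank: A pops it, B's strip drops it; recurse
      have hcells : c0.getD n "  " = "  " ∧ c1.getD n "  " = "  " ∧
          c2.getD n "  " = "  " ∧ c3.getD n "  " = "  " := by
        simpa [phRow] using hb
      rw [if_pos hcells]
      have hlen : (phGrid n c0 c1 c2 c3).length = n := by simp [phGrid]
      have hpop : PySem.List.pop? (phGrid (n + 1) c0 c1 c2 c3) ((n : Nat) : Int)
          = some (phRow c0 c1 c2 c3 n, phGrid n c0 c1 c2 c3) := by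
        rw [PySem.List.pop?_natCast _ n (by simp [phGrid])]
        have herase : (phGrid (n + 1) c0 c1 c2 c3).eraseIdx n = phGrid n c0 c1 c2 c3 := by
          calc (phGrid (n + 1) c0 c1 c2 c3).eraseIdx n
              = (phGrid n c0 c1 c2 c3 ++ [phRow c0 c1 c2 c3 n]).eraseIdx
                  (phGrid n c0 c1 c2 c3).length := by
                rw [hlen]; congr 1; exact phGrid_snoc n c0 c1 c2 c3
            _ = phGrid n c0 c1 c2 c3 := eraseIdx_snoc _ _
        rw [herase]
        congr 1
        simp [phGrid]
      rw [hpop]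
      simp only [Option.map_some, Option.getD_some]
      rw [phGrid_snoc n c0 c1 c2 c3, hb, strip_snoc_blank]
      exact ih
    · -- the bottom row holds something: A stops here, B's strip keeps everything
      have hne : ¬ (c0.getD n "  " = "  " ∧ c1.getD n "  " = "  " ∧
          c2.getD n "  " = "  " ∧ c3.getD n "  " = "  ") := by
        intro hc
        exact hb (by simp only [phRow]; rw [hc.1, hc.2.1, hc.2.2.1, hc.2.2.2])
      rw [if_neg hne]
      have hkeep : printHandAltStrip (phGrid (n + 1) c0 c1 c2 c3) = phGrid (n + 1) c0 c1 c2 c3 := by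
        rw [phGrid_snoc n c0 c1 c2 c3]
        exact strip_snoc_nonblank _ _ hb
      rw [hkeep]
      have : (phGrid (n + 1) c0 c1 c2 c3).length = n + 1 := by simp [phGrid]
      rw [this]

-- rows past every column's end are blank, so stripping ignores them
theorem strip_grid_of_le (c0 c1 c2 c3 : List String)
    (h : max (max c0.length c1.length) (max c2.length c3.length) ≤ m) :
    ∀ k : Nat, printHandAltStrip (phGrid (m + k) c0 c1 c2 c3)
      = printHandAltStrip (phGrid m c0 c1 c2 c3) := by
  intro k
  induction k with
  | zero => rfl
  | succ k ih =>
    have hblank : phRow c0 c1 c2 c3 (m + k) = ["  ", "  ", "  ", "  "] := by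
      have b0 : c0.getD (m + k) "  " = "  " := List.getD_eq_default _ _ (by omega)
      have b1 : c1.getD (m + k) "  " = "  " := List.getD_eq_default _ _ (by omega)
      have b2 : c2.getD (m + k) "  " = "  " := List.getD_eq_default _ _ (by omega)
      have b3 : c3.getD (m + k) "  " = "  " := List.getD_eq_default _ _ (by omega)
      simp only [phRow]; rw [b0, b1, b2, b3]
    rw [show m + (k + 1) = (m + k) + 1 from rfl, phGrid_snoc, hblank, strip_snoc_blank]
    exact ih

-- ===== VERDICT (by name: the statement is the Claim_ definition above) =====
theorem print_hand_spec : Claim_equal_print_hand := by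
  intro hand trump _ hpre
  obtain ⟨-, hc0, hc1, hc2, hc3⟩ := hpre
  show print_hand hand trump = print_hand_alt hand trump
  have hq0 : hand.countP (phQ0 trump) ≤ 8 := by simpa [phQ0] using hc0
  have hq1 : hand.countP (phQ1 trump) ≤ 8 := by simpa [phQ1, phQ0] using hc1
  have hq2 : hand.countP (phQ2 trump) ≤ 8 := by simpa [phQ2, phQ0] using hc2
  have hq3 : hand.countP (phQ3 trump) ≤ 8 := by simpa [phQ3, phQ0] using hc3
  have hfold := foldA_eq trump hand [] [] [] []
    (by simpa using hq0) (by simpa using hq1) (by simpa using hq2) (by simpa using hq3)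
  simp only [List.length_nil, Nat.cast_zero, List.nil_append] at hfold
  have hM8 : max (max (hand.filter (phQ0 trump)).length (hand.filter (phQ1 trump)).length)
      (max (hand.filter (phQ2 trump)).length (hand.filter (phQ3 trump)).length) ≤ 8 := by
    simp only [List.countP_eq_length_filter] at hq0 hq1 hq2 hq3
    exact max_le (max_le hq0 hq1) (max_le hq2 hq3)
  have egrid : (hand.foldl (printHandStepA trump) (0, 0, 0, 0, phGrid 8 [] [] [] [])).2.2.2.2
      = phGrid 8 (hand.filter (phQ0 trump)) (hand.filter (phQ1 trump))
          (hand.filter (phQ2 trump)) (hand.filter (phQ3 trump)) := by rw [hfold]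
  have hcs : hand.foldl (printHandStepB trump) ([], [], [], [])
      = (hand.filter (phQ0 trump), hand.filter (phQ1 trump),
         hand.filter (phQ2 trump), hand.filter (phQ3 trump)) := by
    simpa using foldB_eq trump hand [] [] [] []
  have hshrink := strip_grid_of_le (hand.filter (phQ0 trump)) (hand.filter (phQ1 trump))
      (hand.filter (phQ2 trump)) (hand.filter (phQ3 trump)) (le_refl _)
      (8 - max (max (hand.filter (phQ0 trump)).length (hand.filter (phQ1 trump)).length)
          (max (hand.filter (phQ2 trump)).length (hand.filter (phQ3 trump)).length))
  rw [Nat.add_sub_cancel' hM8] at hshrink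
  calc print_hand hand trump
      = printHandTrim (PySem.List.pyRange 7 (-1) (-1))
          ((hand.foldl (printHandStepA trump) (0, 0, 0, 0, phGrid 8 [] [] [] [])).2.2.2.2)
          8 := rfl
    _ = printHandTrim (PySem.List.pyRange 7 (-1) (-1))
          (phGrid 8 (hand.filter (phQ0 trump)) (hand.filter (phQ1 trump))
            (hand.filter (phQ2 trump)) (hand.filter (phQ3 trump))) 8 := by rw [egrid]
    _ = (printHandAltStrip (phGrid 8 (hand.filter (phQ0 trump)) (hand.filter (phQ1 trump))
            (hand.filter (phQ2 trump)) (hand.filter (phQ3 trump))),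
         ((printHandAltStrip (phGrid 8 (hand.filter (phQ0 trump)) (hand.filter (phQ1 trump))
            (hand.filter (phQ2 trump)) (hand.filter (phQ3 trump)))).length : Int)) :=
        trim_strip _ _ _ _ 8
    _ = print_hand_alt hand trump := by
        rw [hshrink]
        simp only [print_hand_alt]
        rw [hcs]
        rfl
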